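-- pv_equiv track=rewrite | github.com/rcr095/rcr095 | 210CT_CW/210_Q4Week3Adv1.py | checkDupl
-- ===== SOURCE A (Python) =====
-- def checkDupl(cubes):
--     '''
--     Removes a cube of colour 'X' and size 'Z' in case: x - y >= 2
--     - x being the sum of all the cubes of colour 'X' and size 'Z' and y all the other cubes of size 'Z'
--     Removes the smallest cube of colour 'X' in case: x - y >= 2
--     - x being a single colour and y the sum of all the other colours in the list
--     '''
--     cubes = sortCubes(cubes)
--     for x in range(len(cubes)):
--         curCol = cubes[x][0]
--         curCnt = 0
--         othCnt = 0
--         for y in range(len(cubes)):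
--             if cubes[x][0] == cubes[y][0]:
--                 curCnt += 1
--             else:
--                 othCnt += 1
--         if curCnt - othCnt >= 2:
--             newList = []
--             for cube in reversed(cubes):
--                 if cube[0] == curCol:
--                     curCol = None
--                 else:
--                     newList.append(cube)
--             return checkDupl(newList)
--     for i in range(len(cubes)):
--         curCub = cubes[i]
--         curCnt = 0
--         othCnt = 0
--         for j in range(len(cubes)):
--             if cubes[i][1] == cubes[j][1]:
--                 if cubes[i][0] == cubes[j][0]:
--                     curCnt += 1
--                 else:
--                     othCnt += 1
--         if curCnt - othCnt >= 2:
--             newList = []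
--             for cube in cubes:
--                 if cube == curCub:
--                     curCub = None
--                 else:
--                     newList.append(cube)
--             return checkDupl(newList)
--     return cubes
--
-- def sortCubes(cubes):#uses a quicksort like function to sort a list of cubes by their size
--     if len(cubes) <= 1:
--         return cubes
--     bigCubes = None
--     smallCubes = []
--     for cube in cubes:
--         if bigCubes == None:
--             bigCubes = [cube]
--         elif cube[1] > bigCubes[0][1]:
--             smallCubes += bigCubes
--             bigCubes = [cube]
--         elif cube[1] == bigCubes[0][1]:
--             bigCubes += [cube]
--         else:
--             smallCubes += [cube]
--     return bigCubes + sortCubes(smallCubes)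
-- ===== SOURCE B (Python) =====
-- def _firstColIdx(rev, col):
--     # index of the first cube of colour col in rev (a match is guaranteed by the caller)
--     k = 0
--     while rev[k][0] != col:
--         k += 1
--     return k
--
-- def checkDupl(cubes):
--     while True:
--         cubes = sortCubes(cubes)
--         n = len(cubes)
--         colours = {}
--         for c in cubes:
--             colours[c[0]] = colours.get(c[0], 0) + 1
--         hit = None
--         for cube in cubes:
--             if 2 * colours[cube[0]] - n >= 2:
--                 hit = cube[0]
--                 break
--         if hit is not None:
--             rev = cubes[::-1]
--             k = _firstColIdx(rev, hit)
--             cubes = rev[:k] + rev[k + 1:]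
--             continue
--         pairs = {}
--         sizes = {}
--         for c in cubes:
--             pairs[c] = pairs.get(c, 0) + 1
--             sizes[c[1]] = sizes.get(c[1], 0) + 1
--         hit = None
--         for cube in cubes:
--             if 2 * pairs[cube] - sizes[cube[1]] >= 2:
--                 hit = cube
--                 break
--         if hit is None:
--             return cubes
--         k = cubes.index(hit)
--         cubes = cubes[:k] + cubes[k + 1:]
--
-- def sortCubes(cubes):  # kept from the original module: every iteration re-sorts with it
--     if len(cubes) <= 1:
--         return cubes
--     bigCubes = None
--     smallCubes = []
--     for cube in cubes:
--         if bigCubes == None: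
--             bigCubes = [cube]
--         elif cube[1] > bigCubes[0][1]:
--             smallCubes += bigCubes
--             bigCubes = [cube]
--         elif cube[1] == bigCubes[0][1]:
--             bigCubes += [cube]
--         else:
--             smallCubes += [cube]
--     return bigCubes + sortCubes(smallCubes)
-- ===== Notes on version B (the rewrite author's own statement) =====
-- stated objective: faster
-- what changed: Replaces A's tail recursion by an explicit while-loop and, per iteration, replaces A's per-cube O(n) counting rescans by colour/size/pair dictionaries built in one pass, and the flagged rebuild loops by index lookup plus slicing.
import Mathlib
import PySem

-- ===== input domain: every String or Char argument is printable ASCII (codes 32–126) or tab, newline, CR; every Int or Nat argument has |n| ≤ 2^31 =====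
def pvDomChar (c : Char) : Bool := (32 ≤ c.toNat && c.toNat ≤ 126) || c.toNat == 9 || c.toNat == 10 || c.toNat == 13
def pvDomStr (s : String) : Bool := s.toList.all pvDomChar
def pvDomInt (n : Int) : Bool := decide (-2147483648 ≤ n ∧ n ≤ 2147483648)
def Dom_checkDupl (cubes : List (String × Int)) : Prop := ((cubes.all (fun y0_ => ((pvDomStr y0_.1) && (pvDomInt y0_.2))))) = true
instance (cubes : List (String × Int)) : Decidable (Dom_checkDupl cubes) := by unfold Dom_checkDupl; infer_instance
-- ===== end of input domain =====

-- B replaces A's tail recursion by an explicit loop and A's per-cube O(n) counting scans by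
-- dictionaries built in one pass; removal is done by index + slicing instead of flagged rebuild folds.

-- shared helper: sortCubes appears verbatim in both Python sources (A's module and Source B), so it is
-- defined once and used by both ports. Fuel = cubes.length (each recursive call strictly shrinks).
def sortStep (acc : Option (List (String × Int)) × List (String × Int)) (cube : String × Int) :
    Option (List (String × Int)) × List (String × Int) :=
  match acc.1 with
  | none => (some [cube], acc.2)
  | some big =>
      if cube.2 > (big.headD ("", 0)).2 then (some [cube], acc.2 ++ big)
      else if cube.2 == (big.headD ("", 0)).2 then (some (big ++ [cube]), acc.2)
      else (some big, acc.2 ++ [cube])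

def sortCubesFuel : Nat → List (String × Int) → List (String × Int)
  | 0, cubes => cubes
  | fuel + 1, cubes =>
      if cubes.length ≤ 1 then cubes
      else
        let p := cubes.foldl sortStep (none, [])
        p.1.getD [] ++ sortCubesFuel fuel p.2

def sortCubes (cubes : List (String × Int)) : List (String × Int) :=
  sortCubesFuel cubes.length cubes

-- ===== PORT A =====
-- A's colour pass: for each cube (in order) count same-colour vs other-colour over the whole list.
def colourScanA (s : List (String × Int)) : List (String × Int) → Option String
  | [] => none
  | c :: rest =>
      let p := s.foldl (fun (p : Int × Int) y =>
        if y.1 == c.1 then (p.1 + 1, p.2) else (p.1, p.2 + 1)) (0, 0)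
      if p.1 - p.2 ≥ 2 then some c.1 else colourScanA s rest

-- A's (size,colour) pass: count same-size-same-colour vs same-size-other-colour.
def sizeScanA (s : List (String × Int)) : List (String × Int) → Option (String × Int)
  | [] => none
  | c :: rest =>
      let p := s.foldl (fun (p : Int × Int) y =>
        if y.2 == c.2 then (if y.1 == c.1 then (p.1 + 1, p.2) else (p.1, p.2 + 1)) else p) (0, 0)
      if p.1 - p.2 ≥ 2 then some c else sizeScanA s rest

-- A's rebuild loop over reversed(cubes): skip the first same-colour cube (curCol := None after it).
def stepCol (acc : List (String × Int) × Option String) (cube : String × Int) :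
    List (String × Int) × Option String :=
  match acc.2 with
  | some col => if cube.1 == col then (acc.1, none) else (acc.1 ++ [cube], some col)
  | none => (acc.1 ++ [cube], none)

-- A's forward rebuild loop: skip the first cube equal to curCub (curCub := None after it).
def stepCub (acc : List (String × Int) × Option (String × Int)) (cube : String × Int) :
    List (String × Int) × Option (String × Int) :=
  match acc.2 with
  | some cub => if cube == cub then (acc.1, none) else (acc.1 ++ [cube], some cub)
  | none => (acc.1 ++ [cube], none)

-- A's recursion; fuel = length + 1 (each recursive call removes exactly one cube).
def checkDuplFuel : Nat → List (String × Int) → List (String × Int)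
  | 0, cubes => cubes
  | fuel + 1, cubes0 =>
      let cubes := sortCubes cubes0
      match colourScanA cubes cubes with
      | some col => checkDuplFuel fuel (cubes.reverse.foldl stepCol ([], some col)).1
      | none =>
          match sizeScanA cubes cubes with
          | some cub => checkDuplFuel fuel (cubes.foldl stepCub ([], some cub)).1
          | none => cubes

def checkDupl (cubes : List (String × Int)) : List (String × Int) :=
  checkDuplFuel (cubes.length + 1) cubes

-- ===== PORT B =====
-- B's `while rev[k][0] != col: k += 1`
def firstColIdx : List (String × Int) → String → Nat
  | [], _ => 0
  | c :: rest, col => if c.1 == col then 0 else firstColIdx rest col + 1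

-- B's colour pass: one dict lookup per cube.
def colourScanB (colours : PySem.Dict String Int) (n : Int) : List (String × Int) → Option String
  | [] => none
  | c :: rest =>
      if 2 * colours.getD c.1 0 - n ≥ 2 then some c.1 else colourScanB colours n rest

-- B's (size,colour) pass: two dict lookups per cube.
def sizeScanB (pairs : PySem.Dict (String × Int) Int) (sizes : PySem.Dict Int Int) :
    List (String × Int) → Option (String × Int)
  | [] => none
  | c :: rest =>
      if 2 * pairs.getD c 0 - sizes.getD c.2 0 ≥ 2 then some c else sizeScanB pairs sizes rest

-- B's `while True:` loop; fuel = length + 1 (every non-returning iteration removes one cube).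
def loopB : Nat → List (String × Int) → List (String × Int)
  | 0, cubes => cubes
  | fuel + 1, cubes0 =>
      let cubes := sortCubes cubes0
      let n : Int := cubes.length
      let colours := cubes.foldl (fun d c => d.insert c.1 (d.getD c.1 0 + 1)) PySem.Dict.empty
      match colourScanB colours n cubes with
      | some col =>
          let rev := (PySem.List.slice? cubes none none (-1)).getD []
          let k := firstColIdx rev col
          loopB fuel (PySem.List.slice rev none (some (k : Int)) ++
                      PySem.List.slice rev (some ((k : Int) + 1)) none)
      | none =>
          let pairs := cubes.foldl (fun d c => d.insert c (d.getD c 0 + 1)) PySem.Dict.empty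
          let sizes := cubes.foldl (fun d c => d.insert c.2 (d.getD c.2 0 + 1)) PySem.Dict.empty
          match sizeScanB pairs sizes cubes with
          | some cub =>
              let k := (PySem.List.index? cubes cub).getD 0
              loopB fuel (PySem.List.slice cubes none (some (k : Int)) ++
                          PySem.List.slice cubes (some ((k : Int) + 1)) none)
          | none => cubes

def checkDupl_alt (cubes : List (String × Int)) : List (String × Int) :=
  loopB (cubes.length + 1) cubes

-- ===== PRECONDITION & SPEC =====
def Spec_checkDupl (cubes : List (String × Int)) (out : List (String × Int)) : Prop := out = checkDupl_alt cubes
instance (cubes : List (String × Int)) (out : List (String × Int)) : Decidable (Spec_checkDupl cubes out) := by unfold Spec_checkDupl; infer_instance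

-- ===== CLAIM (what is proved, stated in full; the proofs are below) =====
def Claim_equal_checkDupl : Prop := ∀ (cubes : List (String × Int)), Dom_checkDupl cubes → Spec_checkDupl cubes (checkDupl cubes)

-- ===== LEMMAS AND PROOFS =====
-- counting folds
theorem foldPairCount {α : Type} (p : α → Bool) :
    ∀ (s : List α) (a b : Int),
      s.foldl (fun (q : Int × Int) y => if p y then (q.1 + 1, q.2) else (q.1, q.2 + 1)) (a, b)
        = (a + s.countP p, b + s.countP (fun y => !(p y))) := by
  intro s
  induction s with
  | nil => intro a b; simp
  | cons c rest ih =>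
    intro a b
    by_cases h : p c <;> simp [h, ih] <;> ring

theorem foldPairCount2 {α : Type} (p q : α → Bool) :
    ∀ (s : List α) (a b : Int),
      s.foldl (fun (r : Int × Int) y =>
          if p y then (if q y then (r.1 + 1, r.2) else (r.1, r.2 + 1)) else r) (a, b)
        = (a + s.countP (fun y => p y && q y), b + s.countP (fun y => p y && !(q y))) := by
  intro s
  induction s with
  | nil => intro a b; simp
  | cons c rest ih =>
    intro a b
    by_cases hp : p c <;> by_cases hq : q c <;> simp [hp, hq, ih] <;> ring

theorem countP_split {α : Type} (p q : α → Bool) (s : List α) :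
    s.countP (fun y => p y && q y) + s.countP (fun y => p y && !(q y)) = s.countP p := by
  induction s with
  | nil => simp
  | cons c rest ih =>
    by_cases hp : p c <;> by_cases hq : q c <;> simp [hp, hq] <;> omega

theorem countP_not {α : Type} (p : α → Bool) (s : List α) :
    s.countP p + s.countP (fun y => !(p y)) = s.length := by
  induction s with
  | nil => simp
  | cons c rest ih => by_cases h : p c <;> simp [h] <;> omega

theorem colours_getD (s : List (String × Int)) (v : String) :
    (s.foldl (fun d c => d.insert c.1 (d.getD c.1 0 + 1)) PySem.Dict.empty).getD v 0
      = (s.countP (fun y => y.1 == v) : Int) := by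
  rw [← List.foldl_map (f := fun c : String × Int => c.1)
        (g := fun (d : PySem.Dict String Int) x => d.insert x (d.getD x 0 + 1)),
    PySem.Dict.foldl_insert_getD_add_one_eq_counter, PySem.Dict.getD_counter]
  norm_cast
  rw [List.count_eq_countP, List.countP_map]
  rfl

theorem sizes_getD (s : List (String × Int)) (v : Int) :
    (s.foldl (fun d c => d.insert c.2 (d.getD c.2 0 + 1)) PySem.Dict.empty).getD v 0
      = (s.countP (fun y => y.2 == v) : Int) := by
  rw [← List.foldl_map (f := fun c : String × Int => c.2)
        (g := fun (d : PySem.Dict Int Int) x => d.insert x (d.getD x 0 + 1)),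
    PySem.Dict.foldl_insert_getD_add_one_eq_counter, PySem.Dict.getD_counter]
  norm_cast
  rw [List.count_eq_countP, List.countP_map]
  rfl

theorem pairs_getD (s : List (String × Int)) (v : String × Int) :
    (s.foldl (fun d c => d.insert c (d.getD c 0 + 1)) PySem.Dict.empty).getD v 0
      = (s.countP (fun y => y.2 == v.2 && y.1 == v.1) : Int) := by
  rw [PySem.Dict.foldl_insert_getD_add_one_eq_counter, PySem.Dict.getD_counter]
  norm_cast
  rw [List.count_eq_countP]
  exact List.countP_congr (fun y _ => by
    cases y; cases v
    simp [Prod.ext_iff, and_comm])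

theorem colourScan_eq (s : List (String × Int)) :
    ∀ rest, colourScanA s rest
      = colourScanB (s.foldl (fun d c => d.insert c.1 (d.getD c.1 0 + 1)) PySem.Dict.empty)
          (s.length : Int) rest := by
  intro rest
  induction rest with
  | nil => rfl
  | cons c r ih =>
    have hcnt := countP_not (fun y => y.1 == c.1) s
    have hiff : (((0 : Int) + (s.countP (fun y => y.1 == c.1) : Int),
          (0 : Int) + (s.countP (fun y => !(y.1 == c.1)) : Int)).1
          - ((0 : Int) + (s.countP (fun y => y.1 == c.1) : Int),
          (0 : Int) + (s.countP (fun y => !(y.1 == c.1)) : Int)).2 ≥ 2)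
        ↔ (2 * ((s.countP (fun y => y.1 == c.1) : Int)) - (s.length : Int) ≥ 2) := by
      simp only []; omega
    simp only [colourScanA, colourScanB, foldPairCount, colours_getD]
    by_cases h : 2 * ((s.countP (fun y => y.1 == c.1) : Int)) - (s.length : Int) ≥ 2
    · rw [if_pos (hiff.mpr h), if_pos h]
    · rw [if_neg (fun hc => h (hiff.mp hc)), if_neg h, ih]

theorem sizeScan_eq (s : List (String × Int)) :
    ∀ rest, sizeScanA s rest
      = sizeScanB (s.foldl (fun d c => d.insert c (d.getD c 0 + 1)) PySem.Dict.empty)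
          (s.foldl (fun d c => d.insert c.2 (d.getD c.2 0 + 1)) PySem.Dict.empty) rest := by
  intro rest
  induction rest with
  | nil => rfl
  | cons c r ih =>
    have hcnt := countP_split (fun y => y.2 == c.2) (fun y => y.1 == c.1) s
    have hiff : (((0 : Int) + (s.countP (fun y => y.2 == c.2 && y.1 == c.1) : Int),
          (0 : Int) + (s.countP (fun y => y.2 == c.2 && !(y.1 == c.1)) : Int)).1
          - ((0 : Int) + (s.countP (fun y => y.2 == c.2 && y.1 == c.1) : Int),
          (0 : Int) + (s.countP (fun y => y.2 == c.2 && !(y.1 == c.1)) : Int)).2 ≥ 2)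
        ↔ (2 * ((s.countP (fun y => y.2 == c.2 && y.1 == c.1) : Int))
            - (s.countP (fun y => y.2 == c.2) : Int) ≥ 2) := by
      simp only []; omega
    simp only [sizeScanA, sizeScanB, foldPairCount2, pairs_getD, sizes_getD]
    by_cases h : 2 * ((s.countP (fun y => y.2 == c.2 && y.1 == c.1) : Int))
        - (s.countP (fun y => y.2 == c.2) : Int) ≥ 2
    · rw [if_pos (hiff.mpr h), if_pos h]
    · rw [if_neg (fun hc => h (hiff.mp hc)), if_neg h, ih]

theorem colourScanA_mem (s : List (String × Int)) :
    ∀ rest col, colourScanA s rest = some col → ∃ c ∈ rest, c.1 = col := by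
  intro rest
  induction rest with
  | nil => intro col h; simp [colourScanA] at h
  | cons c r ih =>
    intro col h
    simp only [colourScanA] at h
    split at h
    · exact ⟨c, List.mem_cons_self, by injection h⟩
    · obtain ⟨d, hd, hdc⟩ := ih col h
      exact ⟨d, List.mem_cons_of_mem _ hd, hdc⟩

theorem sizeScanA_mem (s : List (String × Int)) :
    ∀ rest cub, sizeScanA s rest = some cub → cub ∈ rest := by
  intro rest
  induction rest with
  | nil => intro cub h; simp [sizeScanA] at h
  | cons c r ih =>
    intro cub h
    simp only [sizeScanA] at h
    split at h
    · injection h with h; exact h ▸ List.mem_cons_self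
    · exact List.mem_cons_of_mem _ (ih cub h)

theorem foldStepCol_none : ∀ (l : List (String × Int)) (acc : List (String × Int)),
    l.foldl stepCol (acc, none) = (acc ++ l, none) := by
  intro l
  induction l with
  | nil => simp
  | cons c r ih => intro acc; simp [stepCol, ih]

theorem foldStepCol_some : ∀ (l acc : List (String × Int)) (col : String),
    (∃ c ∈ l, c.1 = col) →
    (l.foldl stepCol (acc, some col)).1
      = acc ++ (l.take (firstColIdx l col) ++ l.drop (firstColIdx l col + 1)) := by
  intro l
  induction l with
  | nil => intro acc col h; simp at h
  | cons c r ih =>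
    intro acc col h
    by_cases hc : c.1 = col
    · simp [List.foldl_cons, stepCol, hc, firstColIdx, foldStepCol_none]
    · have hr : ∃ d ∈ r, d.1 = col := by
        obtain ⟨d, hd, hdc⟩ := h
        rcases List.mem_cons.mp hd with h1 | h2
        · exact absurd (h1 ▸ hdc) hc
        · exact ⟨d, h2, hdc⟩
      have hbeq : (c.1 == col) = false := by simp [hc]
      simp only [List.foldl_cons, stepCol, hbeq, Bool.false_eq_true, if_false]
      rw [ih (acc ++ [c]) col hr]
      simp [firstColIdx, hbeq]

theorem foldStepCub_none : ∀ (l : List (String × Int)) (acc : List (String × Int)),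
    l.foldl stepCub (acc, none) = (acc ++ l, none) := by
  intro l
  induction l with
  | nil => simp
  | cons c r ih => intro acc; simp [stepCub, ih]

theorem foldStepCub_some : ∀ (l acc : List (String × Int)) (cub : String × Int),
    cub ∈ l →
    (l.foldl stepCub (acc, some cub)).1
      = acc ++ (l.take ((PySem.List.index? l cub).getD 0)
          ++ l.drop ((PySem.List.index? l cub).getD 0 + 1)) := by
  intro l
  induction l with
  | nil => intro acc cub h; simp at h
  | cons c r ih =>
    intro acc cub h
    by_cases hc : c = cub
    · subst hc
      rw [List.foldl_cons, PySem.List.index?_cons_self]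
      simp [stepCub, foldStepCub_none]
    · have hr : cub ∈ r := by
        rcases List.mem_cons.mp h with h1 | h2
        · exact absurd h1.symm hc
        · exact h2
      obtain ⟨k, hk⟩ := Option.isSome_iff_exists.mp ((PySem.List.index?_isSome_iff r cub).mpr hr)
      have hbeq : (c == cub) = false := by simp [hc]
      have h2 : PySem.List.index? (c :: r) cub = some (k + 1) := by
        rw [PySem.List.index?_cons_of_ne r hc, hk]; rfl
      simp only [List.foldl_cons, stepCub, hbeq, Bool.false_eq_true, if_false]
      rw [ih (acc ++ [c]) cub hr, hk, h2]
      simp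

theorem main_eq : ∀ (fuel : Nat) (cubes : List (String × Int)),
    checkDuplFuel fuel cubes = loopB fuel cubes := by
  intro fuel
  induction fuel with
  | zero => intro cubes; rfl
  | succ f ih =>
    intro cubes0
    simp only [checkDuplFuel, loopB]
    set s := sortCubes cubes0 with hs
    rw [← colourScan_eq s s]
    cases h : colourScanA s s with
    | none =>
      rw [← sizeScan_eq s s]
      cases h2 : sizeScanA s s with
      | none => simp
      | some cub =>
        simp only [h2]
        have hmem := sizeScanA_mem s s cub h2
        rw [foldStepCub_some s [] cub hmem]
        rw [PySem.List.slice_to_natCast,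
          show (((PySem.List.index? s cub).getD 0 : Int) + 1)
              = (((PySem.List.index? s cub).getD 0 + 1 : Nat) : Int) by push_cast; ring,
          PySem.List.slice_from_natCast]
        simp only [List.nil_append]
        exact ih _
    | some col =>
      simp only [PySem.List.slice?_none_none_neg_one, Option.getD_some]
      have hmem : ∃ c ∈ s.reverse, c.1 = col := by
        obtain ⟨c, hc, hcol⟩ := colourScanA_mem s s col h
        exact ⟨c, List.mem_reverse.mpr hc, hcol⟩
      rw [foldStepCol_some s.reverse [] col hmem]
      rw [PySem.List.slice_to_natCast,
        show ((firstColIdx s.reverse col : Int) + 1)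
            = ((firstColIdx s.reverse col + 1 : Nat) : Int) by push_cast; ring,
        PySem.List.slice_from_natCast]
      simp only [List.nil_append]
      exact ih _

-- ===== VERDICT (by name: the statement is the Claim_ definition above) =====
theorem checkDupl_spec : Claim_equal_checkDupl := by
  intro cubes _
  unfold Spec_checkDupl checkDupl checkDupl_alt
  exact main_eq _ _
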